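-- pv_equiv track=rewrite | github.com/aureleon/image-a-fiche | create_cards.py | attempt_message_join
-- ===== SOURCE A (Python) =====
-- def attempt_message_join(truncated_message: str, new_message: str):
--     """
--     Attempts to find the point at the end of the truncated message to place
--     the new message at, and returns a concatenated message with proper placement.
--     """
--     truncated_reverse = ''.join(reversed(truncated_message))
--
--     # Start with the entire string to attempt to find at the end of the source,
--     # then reduce in scope until we (hopefully) find the substring in question.
--     n = len(new_message)
--     while n > 0:
--         substring = ''.join(reversed(new_message[:n]))
--         if (index := truncated_reverse.find(substring)) >= 0:
--             stopn = len(truncated_message) - (n + index)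
--             return truncated_message[:stopn] + new_message
--         n -= 1
--     return ''
-- ===== SOURCE B (Python) =====
-- def attempt_message_join(truncated_message: str, new_message: str):
--     """
--     Binary search on the prefix length (prefix-occurrence is monotone), then a
--     single rfind to locate the rightmost occurrence of the longest prefix.
--     """
--     lo, hi = 0, len(new_message)
--     # Invariant: new_message[:lo] occurs in truncated_message; no prefix longer than hi does.
--     while lo < hi:
--         mid = (lo + hi + 1) // 2
--         if new_message[:mid] in truncated_message:
--             lo = mid
--         else:
--             hi = mid - 1
--     if lo == 0:
--         return ''
--     idx = truncated_message.rfind(new_message[:lo])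
--     return truncated_message[:idx] + new_message
-- ===== Notes on version B (the rewrite author's own statement) =====
-- stated objective: faster
-- what changed: Replaces A's linear countdown over all prefix lengths (each tested via find on a reversed copy) with a binary search on the prefix length (prefix-occurrence in the text is monotone) followed by a single rfind for the winning prefix.
import Mathlib
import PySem

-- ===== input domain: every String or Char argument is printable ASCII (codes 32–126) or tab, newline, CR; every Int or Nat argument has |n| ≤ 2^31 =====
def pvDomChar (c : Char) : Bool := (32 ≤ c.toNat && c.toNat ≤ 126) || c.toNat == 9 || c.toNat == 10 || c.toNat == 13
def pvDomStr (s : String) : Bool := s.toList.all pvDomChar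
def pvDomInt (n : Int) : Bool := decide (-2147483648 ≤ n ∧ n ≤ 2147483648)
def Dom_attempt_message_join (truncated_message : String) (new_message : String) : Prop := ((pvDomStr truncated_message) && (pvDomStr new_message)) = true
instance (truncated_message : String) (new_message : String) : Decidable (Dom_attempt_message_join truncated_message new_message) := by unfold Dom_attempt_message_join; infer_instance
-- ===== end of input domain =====

-- B replaces A's linear countdown over prefix lengths by a binary search on the
-- prefix length plus a single rfind; the two ports are proved to agree on all inputs.

-- ===== PORT A =====
-- the while-loop of A: n counts down; body is a literal transcription
def aJoin (t trev new : List Char) : Nat → List Char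
  | 0 => []
  | n + 1 =>
    let substring := (new.take (n + 1)).reverse
    let index := PySem.Chars.find trev substring
    if 0 ≤ index then
      let stopn : Int := (t.length : Int) - (((n + 1 : Nat) : Int) + index)
      PySem.List.slice t none (some stopn) ++ new
    else
      aJoin t trev new n

def attempt_message_join (truncated_message : String) (new_message : String) : String :=
  let t := truncated_message.toList
  let truncated_reverse := t.reverse
  let new := new_message.toList
  String.ofList (aJoin t truncated_reverse new new.length)

-- ===== PORT B =====
-- the binary-search loop of B: invariant "new[:lo] occurs in t, nothing longer than hi does"
def bSearch (t new : List Char) (lo hi : Nat) : Nat :=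
  if _h : lo < hi then
    let mid := (lo + hi + 1) / 2
    if PySem.Chars.isIn (new.take mid) t then
      bSearch t new mid hi
    else
      bSearch t new lo (mid - 1)
  else
    lo
termination_by hi - lo
decreasing_by all_goals omega

def attempt_message_join_alt (truncated_message : String) (new_message : String) : String :=
  let t := truncated_message.toList
  let new := new_message.toList
  let lo := bSearch t new 0 new.length
  if lo = 0 then ""
  else
    let idx := PySem.Chars.rfind t (new.take lo)
    String.ofList (PySem.List.slice t none (some idx) ++ new)

-- ===== PRECONDITION & SPEC =====
def Spec_attempt_message_join (truncated_message : String) (new_message : String) (out : String) : Prop := out = attempt_message_join_alt truncated_message new_message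
instance (truncated_message : String) (new_message : String) (out : String) : Decidable (Spec_attempt_message_join truncated_message new_message out) := by unfold Spec_attempt_message_join; infer_instance

-- ===== CLAIM (what is proved, stated in full; the proofs are below) =====
def Claim_equal_attempt_message_join : Prop := ∀ (truncated_message : String) (new_message : String), Dom_attempt_message_join truncated_message new_message → Spec_attempt_message_join truncated_message new_message (attempt_message_join truncated_message new_message)

-- ===== LEMMAS AND PROOFS =====

-- "the n-character prefix of new occurs in t"
def OccP (t new : List Char) (n : Nat) : Prop := new.take n <:+: t

theorem occP_mono (t new : List Char) {m n : Nat} (h : m ≤ n) (hn : OccP t new n) :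
    OccP t new m :=
  ((List.take_prefix_take_left h).isInfix).trans hn

-- a suffix of a take is a prefix of the corresponding drop
theorem suffix_take_iff (p t : List Char) {m : Nat} (hm : m ≤ t.length) :
    p <:+ t.take m ↔ p.length ≤ m ∧ p <+: t.drop (m - p.length) := by
  constructor
  · rintro ⟨u, hu⟩
    have hlen : u.length + p.length = m := by
      have := congrArg List.length hu
      simp at this
      omega
    have h2 : m - p.length = u.length := by omega
    have ht : t = u ++ (p ++ t.drop m) := by
      conv_lhs => rw [← List.take_append_drop m t, ← hu]
      rw [List.append_assoc]
    have hdrop : t.drop (m - p.length) = p ++ t.drop m := by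
      rw [h2]
      calc t.drop u.length = (u ++ (p ++ t.drop m)).drop u.length := by rw [← ht]
        _ = p ++ t.drop m := by simp
    exact ⟨by omega, ⟨t.drop m, hdrop.symm⟩⟩
  · rintro ⟨hlen, v, hv⟩
    have h4 : (t.drop (m - p.length)).take p.length = p := by
      rw [← hv]; exact List.take_left
    refine ⟨t.take (m - p.length), ?_⟩
    conv_rhs => rw [show m = (m - p.length) + p.length by omega, List.take_add]
    rw [h4]
-- occurrence in the reversed text ↔ occurrence in the text (position flipped)
theorem rev_occ_iff (p t : List Char) (i : Nat) (hp : p ≠ []) :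
    p.reverse <+: t.reverse.drop i ↔
      i + p.length ≤ t.length ∧ p <+: t.drop (t.length - p.length - i) := by
  rw [List.drop_reverse, List.reverse_prefix]
  by_cases hi : i ≤ t.length
  · rw [suffix_take_iff p t (by omega)]
    constructor
    · rintro ⟨h1, h2⟩
      refine ⟨by omega, ?_⟩
      have : t.length - i - p.length = t.length - p.length - i := by omega
      rwa [this] at h2
    · rintro ⟨h1, h2⟩
      refine ⟨by omega, ?_⟩
      have : t.length - p.length - i = t.length - i - p.length := by omega
      rwa [this] at h2
  · have : t.length - i = 0 := by omega
    rw [this]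
    simp only [List.take_zero]
    constructor
    · rintro ⟨u, hu⟩
      exact absurd (List.append_eq_nil_iff.mp hu).2 hp
    · rintro ⟨h1, _⟩
      exfalso
      have h3 : 0 < p.length := List.length_pos_iff.mpr hp
      omega

-- an occurrence position cannot exceed length - |p|
theorem occ_pos_le (p t : List Char) {j : Nat} (hp : p ≠ []) (h : p <+: t.drop j) :
    j + p.length ≤ t.length := by
  have h1 : p.length ≤ (t.drop j).length := h.length_le
  have h2 : (t.drop j).length = t.length - j := by simp
  have h3 : 0 < p.length := List.length_pos_iff.mpr hp
  omega

-- rfind.go finds the greatest occurrence position ≤ j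
theorem rfind_go_spec (t p : List Char) (j : Nat)
    (h : ∃ i ≤ j, p <+: t.drop i) :
    ∃ k : Nat, PySem.Chars.rfind.go t p j = (k : Int) ∧ k ≤ j ∧ p <+: t.drop k ∧
      ∀ i, k < i → i ≤ j → ¬ p <+: t.drop i := by
  induction j with
  | zero =>
    obtain ⟨i, hi, hocc⟩ := h
    interval_cases i
    refine ⟨0, ?_, le_refl _, by simpa using hocc, by omega⟩
    simp only [PySem.Chars.rfind.go]
    rw [if_pos (List.isPrefixOf_iff_prefix.mpr (by simpa using hocc))]
    norm_num
  | succ j ih =>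
    by_cases hj : p <+: t.drop (j + 1)
    · refine ⟨j + 1, ?_, le_refl _, hj, by omega⟩
      simp only [PySem.Chars.rfind.go]
      rw [if_pos (List.isPrefixOf_iff_prefix.mpr hj)]
    · obtain ⟨i, hi, hocc⟩ := h
      have hi' : i ≤ j := by
        rcases Nat.lt_or_ge i (j + 1) with h' | h'
        · omega
        · exfalso; apply hj; have : i = j + 1 := by omega
          rwa [this] at hocc
      obtain ⟨k, hk, hk1, hk2, hk3⟩ := ih ⟨i, hi', hocc⟩
      refine ⟨k, ?_, by omega, hk2, ?_⟩
      · simp only [PySem.Chars.rfind.go]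
        rw [if_neg (by rw [List.isPrefixOf_iff_prefix]; exact hj)]
        exact hk
      · intro i' h1 h2
        rcases Nat.lt_or_ge i' (j + 1) with h' | h'
        · exact hk3 i' h1 (by omega)
        · have : i' = j + 1 := by omega
          rw [this]; exact hj

-- rfind returns the greatest occurrence position, for an occurring p
theorem rfind_spec (t p : List Char) (hp : p ≠ []) (h : p <:+: t) :
    ∃ k : Nat, PySem.Chars.rfind t p = (k : Int) ∧ p <+: t.drop k ∧
      ∀ i, k < i → ¬ p <+: t.drop i := by
  have hex : ∃ i ≤ t.length, p <+: t.drop i := by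
    obtain ⟨u, v, huv⟩ := h
    refine ⟨u.length, ?_, ⟨v, ?_⟩⟩
    · have := congrArg List.length huv
      simp at this; omega
    · rw [← huv, List.append_assoc]
      simp
  obtain ⟨k, hk, hk1, hk2, hk3⟩ := rfind_go_spec t p t.length hex
  refine ⟨k, hk, hk2, ?_⟩
  intro i hi hocc
  by_cases h' : i ≤ t.length
  · exact hk3 i hi h' hocc
  · have := occ_pos_le p t hp hocc
    omega

-- find on the reversed text locates the rightmost occurrence: A's index = rfind
theorem stopn_eq_rfind (t p : List Char) (hp : p ≠ []) (h : p <:+: t) :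
    (t.length : Int) - ((p.length : Int) + PySem.Chars.find t.reverse p.reverse) =
      PySem.Chars.rfind t p := by
  have hrev : p.reverse <:+: t.reverse := List.reverse_infix.mpr h
  have hfind : 0 ≤ PySem.Chars.find t.reverse p.reverse :=
    (PySem.Chars.find_nonneg_iff _ _).mpr hrev
  obtain ⟨hpref, hmin⟩ := PySem.Chars.find_spec hfind
  set i := (PySem.Chars.find t.reverse p.reverse).toNat with hidef
  have hieq : PySem.Chars.find t.reverse p.reverse = (i : Int) := by omega
  obtain ⟨hle, hocc⟩ := (rev_occ_iff p t i hp).mp hpref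
  obtain ⟨k, hk, hk1, hk2⟩ := rfind_spec t p hp h
  -- k is the greatest occurrence; show t.length - p.length - i = k
  have hjocc : p <+: t.drop (t.length - p.length - i) := hocc
  have hkle : k + p.length ≤ t.length := occ_pos_le p t hp hk1
  have hkge : k ≥ t.length - p.length - i := by
    by_contra hlt
    exact hk2 (t.length - p.length - i) (by omega) hjocc
  have hkle2 : k ≤ t.length - p.length - i := by
    by_contra hlt
    -- k > t.length - p.length - i : then i' := t.length - p.length - k < i is an occurrence in reverse
    have hi' : (t.length - p.length - k) + p.length ≤ t.length := by omega
    have : p.reverse <+: t.reverse.drop (t.length - p.length - k) := by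
      rw [rev_occ_iff p t _ hp]
      refine ⟨by omega, ?_⟩
      have : t.length - p.length - (t.length - p.length - k) = k := by omega
      rwa [this]
    exact hmin (t.length - p.length - k) (by omega) this
  have : k = t.length - p.length - i := by omega
  rw [hk, hieq, this]
  omega

-- P 0 always holds
theorem occP_zero (t new : List Char) : OccP t new 0 := by
  simp [OccP]

-- the A-loop computes the join at the greatest occurring prefix length
theorem aJoin_eq (t new : List Char) (fuel n : Nat)
    (hn : n ≤ fuel) (hfuel : fuel ≤ new.length)
    (hP : OccP t new n)
    (hmax : ∀ k, n < k → k ≤ new.length → ¬ OccP t new k) :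
    aJoin t t.reverse new fuel =
      if n = 0 then []
      else PySem.List.slice t none
            (some ((t.length : Int) - (((n : Nat) : Int) +
              PySem.Chars.find t.reverse (new.take n).reverse))) ++ new := by
  induction fuel with
  | zero =>
    have : n = 0 := by omega
    simp [aJoin, this]
  | succ f ih =>
    simp only [aJoin]
    by_cases hf : OccP t new (f + 1)
    · -- found at f+1, so n = f+1 (else hmax contradicts)
      have hne : n = f + 1 := by
        by_contra hne
        exact hmax (f + 1) (by omega) hfuel hf
      have hpos : 0 ≤ PySem.Chars.find t.reverse (new.take (f + 1)).reverse := by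
        rw [PySem.Chars.find_nonneg_iff]
        exact List.reverse_infix.mpr hf
      rw [if_pos hpos, if_neg (by omega)]
      rw [hne]
    · have hneg : ¬ 0 ≤ PySem.Chars.find t.reverse (new.take (f + 1)).reverse := by
        rw [PySem.Chars.find_nonneg_iff]
        intro hc
        exact hf (List.reverse_infix.mp hc)
      rw [if_neg hneg]
      have hn' : n ≤ f := by
        rcases Nat.lt_or_ge n (f + 1) with h' | h'
        · omega
        · exfalso; apply hf
          have : n = f + 1 := by omega
          rwa [this] at hP
      exact ih hn' (by omega)

-- the binary search computes a greatest occurring prefix length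
theorem bSearch_spec (t new : List Char) (lo hi : Nat)
    (hlohi : lo ≤ hi) (hhi : hi ≤ new.length)
    (hlo : OccP t new lo)
    (hmax : ∀ k, hi < k → k ≤ new.length → ¬ OccP t new k) :
    bSearch t new lo hi ≤ hi ∧ OccP t new (bSearch t new lo hi) ∧
      ∀ k, bSearch t new lo hi < k → k ≤ new.length → ¬ OccP t new k := by
  by_cases h : lo < hi
  · rw [bSearch, dif_pos h]
    set mid := (lo + hi + 1) / 2 with hmid
    have hmid1 : lo < mid := by omega
    have hmid2 : mid ≤ hi := by omega
    by_cases hin : PySem.Chars.isIn (new.take mid) t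
    · rw [if_pos hin]
      have : OccP t new mid := (PySem.Chars.isIn_iff_infix _ _).mp hin
      exact bSearch_spec t new mid hi hmid2 hhi this hmax
    · rw [if_neg hin]
      have hnot : ¬ OccP t new mid := by
        intro hc
        exact hin ((PySem.Chars.isIn_iff_infix _ _).mpr hc)
      have hmax' : ∀ k, mid - 1 < k → k ≤ new.length → ¬ OccP t new k := by
        intro k h1 h2 hk
        rcases Nat.lt_or_ge hi k with h' | h'
        · exact hmax k h' h2 hk
        · exact hnot (occP_mono t new (by omega) hk)
      obtain ⟨a, b, c⟩ := bSearch_spec t new lo (mid - 1) (by omega) (by omega) hlo hmax'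
      exact ⟨by omega, b, c⟩
  · rw [bSearch, dif_neg h]
    exact ⟨by omega, hlo, fun k h1 h2 => hmax k (by omega) h2⟩
termination_by hi - lo
decreasing_by all_goals omega

-- ===== VERDICT (by name: the statement is the Claim_ definition above) =====
theorem attempt_message_join_spec : Claim_equal_attempt_message_join := by
  intro tm nm _
  unfold Spec_attempt_message_join
  show String.ofList (aJoin tm.toList tm.toList.reverse nm.toList nm.toList.length) =
    (if bSearch tm.toList nm.toList 0 nm.toList.length = 0 then ""
     else String.ofList (PySem.List.slice tm.toList none
       (some (PySem.Chars.rfind tm.toList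
         (nm.toList.take (bSearch tm.toList nm.toList 0 nm.toList.length)))) ++ nm.toList))
  set t := tm.toList
  set new := nm.toList
  obtain ⟨hle, hP, hmax⟩ := bSearch_spec t new 0 new.length (by omega) (le_refl _)
    (occP_zero t new) (by omega)
  set n := bSearch t new 0 new.length with hndef
  rw [aJoin_eq t new new.length n hle (le_refl _) hP hmax]
  by_cases hn : n = 0
  · simp [hn]
  · rw [if_neg hn, if_neg hn]
    have hlen : (new.take n).length = n := by
      rw [List.length_take]
      omega
    have hpne : new.take n ≠ [] := by
      intro hc
      apply hn
      rw [← hlen, hc]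
      rfl
    have := stopn_eq_rfind t (new.take n) hpne hP
    rw [hlen] at this
    rw [this]
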